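-- pv_equiv track=rewrite | github.com/danyluis/aoc | 2015/03-delivery/03.py | follow_route
-- ===== SOURCE A (Python) =====
-- moves = {
--     '^' : (-1, 0),
--     '>' : (0, 1),
--     '<' : (0, -1),
--     'v' : (1, 0)
-- }
--
-- def follow_route(steps):
--     curr = (0, 0)
--     visited = {curr}
--     for d in steps:
--         move = moves[d]
--         curr = (curr[0] + move[0], curr[1] + move[1])
--         visited.add(curr)
--     return visited
-- ===== SOURCE B (Python) =====
-- moves = {
--     '^' : (-1, 0),
--     '>' : (0, 1),
--     '<' : (0, -1),
--     'v' : (1, 0)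
-- }
--
-- def _visited(deltas):
--     # visited set of the route, relative to its own starting point
--     if not deltas:
--         return {(0, 0)}
--     dr, dc = deltas[0]
--     return {(0, 0)} | {(dr + r, dc + c) for (r, c) in _visited(deltas[1:])}
--
-- def follow_route(steps):
--     return _visited([moves[d] for d in steps])
-- ===== Notes on version B (the rewrite author's own statement) =====
-- stated objective: alternative
-- what changed: B replaces A's forward loop that maintains a current position and a growing set by a structural recursion on the route: the visited set of d::rest is {origin} united with the visited set of rest (computed relative to rest's own start) translated as a whole by d's delta, so no running position exists anywhere in B.
import Mathlib
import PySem

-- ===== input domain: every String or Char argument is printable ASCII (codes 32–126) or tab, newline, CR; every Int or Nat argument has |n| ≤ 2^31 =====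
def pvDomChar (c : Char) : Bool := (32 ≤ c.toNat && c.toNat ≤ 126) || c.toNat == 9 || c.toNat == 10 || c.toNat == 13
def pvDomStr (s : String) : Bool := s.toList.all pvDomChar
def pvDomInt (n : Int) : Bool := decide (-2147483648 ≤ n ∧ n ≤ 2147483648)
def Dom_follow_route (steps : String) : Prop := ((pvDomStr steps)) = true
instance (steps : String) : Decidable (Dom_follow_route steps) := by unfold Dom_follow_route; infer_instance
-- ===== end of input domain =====

-- B computes the visited set by structural recursion with whole-set translation ({origin} ∪ shift(visited(tail))) instead of A's loop with a running position; alternative decomposition, not faster.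

-- ===== PORT A =====
-- the module-level 'moves' dict
def movesDict : PySem.Dict Char (Int × Int) :=
  ((((PySem.Dict.empty).insert '^' (-1, 0)).insert '>' (0, 1)).insert '<' (0, -1)).insert 'v' (1, 0)

-- moves[d]: total lookup with default (0,0); exact under Pre_ (KeyError inputs excluded)
def follow_route (steps : String) : List (Int × Int) :=
  (steps.toList.foldl
    (fun st d =>
      let move := movesDict.getD d (0, 0)
      let curr := (st.1.1 + move.1, st.1.2 + move.2)
      (curr, PySem.Set.add st.2 curr))
    (((0, 0) : Int × Int), PySem.Set.add PySem.Set.empty ((0, 0) : Int × Int))).2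

-- ===== PORT B =====
-- _visited(deltas): visited set of the route relative to its own starting point
def pvVisited : List (Int × Int) → PySem.Set (Int × Int)
  | [] => PySem.Set.add PySem.Set.empty ((0, 0) : Int × Int)
  | m :: rest =>
      PySem.Set.union (PySem.Set.add PySem.Set.empty ((0, 0) : Int × Int))
        (PySem.Set.ofList ((pvVisited rest).map (fun p => (m.1 + p.1, m.2 + p.2))))

def follow_route_alt (steps : String) : List (Int × Int) :=
  pvVisited (steps.toList.map (fun d => movesDict.getD d (0, 0)))

-- ===== PRECONDITION & SPEC =====
-- Pre_ excludes inputs containing a character other than '^','>','<','v': there A (and B) raise KeyError.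
def Pre_follow_route (steps : String) : Prop :=
  steps.toList.all (fun c => c = '^' ∨ c = '>' ∨ c = '<' ∨ c = 'v') = true
instance (steps : String) : Decidable (Pre_follow_route steps) := by unfold Pre_follow_route; infer_instance
def pvWitness_follow_route : String := "^>v<>"

def Spec_follow_route (steps : String) (out : List (Int × Int)) : Prop := out = follow_route_alt steps
instance (steps : String) (out : List (Int × Int)) : Decidable (Spec_follow_route steps out) := by unfold Spec_follow_route; infer_instance

-- ===== CLAIM (what is proved, stated in full; the proofs are below) =====
def Claim_equal_follow_route : Prop := ∀ (steps : String), Dom_follow_route steps → Pre_follow_route steps → Spec_follow_route steps (follow_route steps)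

-- ===== LEMMAS AND PROOFS =====
-- the position stream of a delta list, starting at c
def pvStep (p m : Int × Int) : Int × Int := (p.1 + m.1, p.2 + m.2)

-- A's loop, from any current position c and accumulated set s, adds exactly the tail of the scanl stream.
lemma foldA_eq_scanl (l : List Char) (c : Int × Int) (s : PySem.Set (Int × Int)) :
    (l.foldl (fun st d =>
        let move := movesDict.getD d (0, 0)
        let curr := (st.1.1 + move.1, st.1.2 + move.2)
        (curr, PySem.Set.add st.2 curr)) (c, s)).2
    = ((l.scanl (fun p d => pvStep p (movesDict.getD d (0, 0))) c).tail).foldl PySem.Set.add s := by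
  induction l generalizing c s with
  | nil => simp
  | cons d l ih =>
      simp only [List.foldl_cons, List.scanl_cons, List.tail_cons]
      rw [ih]
      cases l with
      | nil => simp [pvStep]
      | cons e t => simp [List.scanl_cons, pvStep]

lemma scanl_map_delta (l : List Char) (g : Char → Int × Int) (c : Int × Int) :
    l.scanl (fun p d => pvStep p (g d)) c = (l.map g).scanl pvStep c := by
  induction l generalizing c with
  | nil => rfl
  | cons d l ih => simp [List.map_cons, List.scanl_cons, ih]

-- translation invariance of the position stream
lemma scanl_shift (l : List (Int × Int)) (c : Int × Int) :
    l.scanl pvStep c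
    = (l.scanl pvStep ((0, 0) : Int × Int)).map (fun p => (c.1 + p.1, c.2 + p.2)) := by
  induction l generalizing c with
  | nil => simp
  | cons m t ih =>
      simp only [List.scanl_cons, List.map_cons]
      rw [ih (pvStep c m), ih (pvStep ((0,0) : Int × Int) m), List.map_map]
      congr 1
      · simp
      · congr 1
        funext p
        simp [pvStep]
        constructor <;> ring

-- dedup commutes with a second dedup under any map
lemma ofList_map_ofList (f : (Int × Int) → (Int × Int)) (xs : List (Int × Int)) :
    PySem.Set.ofList ((PySem.Set.ofList xs).map f) = PySem.Set.ofList (xs.map f) := by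
  induction xs using List.reverseRecOn with
  | nil => rfl
  | append_singleton xs x ih =>
      rw [PySem.Set.ofList_append_singleton, List.map_append, List.map_singleton,
        PySem.Set.ofList_append_singleton]
      by_cases hx : x ∈ PySem.Set.ofList xs
      · rw [PySem.Set.add_of_mem hx, ih]
        have hfx : f x ∈ PySem.Set.ofList (xs.map f) := by
          rw [PySem.Set.mem_ofList] at hx ⊢
          exact List.mem_map_of_mem hx
        rw [PySem.Set.add_of_mem hfx]
      · rw [PySem.Set.add_of_not_mem hx, List.map_append, List.map_singleton,
          PySem.Set.ofList_append_singleton, ih]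

-- {(0,0)} | t  for a Nodup t is ofList ((0,0) :: t)
lemma union_singleton (ys : List (Int × Int)) :
    PySem.Set.union (PySem.Set.add PySem.Set.empty ((0, 0) : Int × Int)) (PySem.Set.ofList ys)
    = PySem.Set.ofList (((0, 0) : Int × Int) :: ys) := by
  simp only [PySem.Set.union, PySem.Set.add, PySem.Set.contains, PySem.Set.empty,
    List.contains_eq_mem, List.not_mem_nil, decide_false, Bool.false_eq_true, reduceIte,
    List.nil_append, PySem.Set.update_eq_append_filter, List.mem_cons, or_false,
    PySem.Set.ofList_ofList, List.cons_append, PySem.Set.ofList_cons, PySem.Set.discard,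
    List.cons.injEq, true_and]
  exact List.filter_congr (fun y _ => by cases h : y == ((0 : Int), (0 : Int)) <;> simp_all)

-- B's recursion computes the deduped position stream
lemma pvVisited_eq_ofList_scanl (l : List (Int × Int)) :
    pvVisited l = PySem.Set.ofList (l.scanl pvStep ((0, 0) : Int × Int)) := by
  induction l with
  | nil => rfl
  | cons m t ih =>
      rw [List.scanl_cons, show pvStep ((0,0) : Int × Int) m = m by simp [pvStep],
        scanl_shift t m]
      rw [pvVisited, ih, ofList_map_ofList, union_singleton]

-- ===== VERDICT (by name: the statement is the Claim_ definition above) =====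
theorem follow_route_spec : Claim_equal_follow_route := by
  intro steps _ _
  unfold Spec_follow_route follow_route follow_route_alt
  rw [foldA_eq_scanl, pvVisited_eq_ofList_scanl, ← scanl_map_delta]
  cases l : steps.toList with
  | nil => simp [PySem.Set.ofList_eq_foldl, PySem.Set.add, PySem.Set.empty, PySem.Set.contains]
  | cons d t => simp [List.scanl_cons, PySem.Set.ofList_eq_foldl, PySem.Set.add, PySem.Set.empty,
      PySem.Set.contains]
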